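-- pv_equiv track=rewrite | github.com/baoluchuling/flutter-to-native | scripts/atlas_verify.py | syntax_coverage_label
-- ===== SOURCE A (Python) =====
-- def syntax_coverage_label(statuses: list[str], enabled: bool) -> str:
--     if not enabled:
--         return "skipped"
--     if not statuses:
--         return "unknown"
--     if all(item == "verified" for item in statuses):
--         return "verified"
--     if any(item == "missing" for item in statuses):
--         return "missing"
--     if any(item in {"partial", "unknown"} for item in statuses):
--         return "partial"
--     return "unknown"
-- ===== SOURCE B (Python) =====
-- _RANK = {"verified": 0, "partial": 2, "unknown": 2, "missing": 3}
-- _LABEL = ("verified", "unknown", "partial", "missing")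
--
-- def syntax_coverage_label(statuses: list[str], enabled: bool) -> str:
--     if not enabled:
--         return "skipped"
--     if not statuses:
--         return "unknown"
--     return _LABEL[max(_RANK.get(s, 1) for s in statuses)]
-- ===== Notes on version B (the rewrite author's own statement) =====
-- stated objective: alternative
-- what changed: Replaces A's cascade of all/any scans with a single max-reduction: each status is mapped to a numeric severity (verified=0, other=1, partial/unknown=2, missing=3) and the maximum severity indexes a label table.
import Mathlib
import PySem

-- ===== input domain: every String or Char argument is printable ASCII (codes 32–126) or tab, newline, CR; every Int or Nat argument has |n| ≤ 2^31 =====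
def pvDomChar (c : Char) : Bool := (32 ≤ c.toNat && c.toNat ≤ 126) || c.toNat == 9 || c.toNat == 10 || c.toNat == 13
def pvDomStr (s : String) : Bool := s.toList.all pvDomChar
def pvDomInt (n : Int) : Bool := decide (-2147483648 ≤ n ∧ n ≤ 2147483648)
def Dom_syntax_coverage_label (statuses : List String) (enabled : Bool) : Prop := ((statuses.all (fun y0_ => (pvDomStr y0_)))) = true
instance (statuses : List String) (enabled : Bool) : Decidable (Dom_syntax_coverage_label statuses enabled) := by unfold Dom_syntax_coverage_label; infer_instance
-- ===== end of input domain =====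

-- B replaces A's cascade of all/any scans with one max-of-severities pass plus a label-table lookup (alternative algorithm, same cost).


-- ===== PORT A =====
def syntax_coverage_label (statuses : List String) (enabled : Bool) : String :=
  if !enabled then "skipped"
  else if statuses = [] then "unknown"
  else if statuses.all (fun item => item == "verified") then "verified"
  else if statuses.any (fun item => item == "missing") then "missing"
  else if statuses.any (fun item => PySem.Set.contains (PySem.Set.ofList ["partial", "unknown"]) item) then "partial"
  else "unknown"

-- ===== PORT B =====
-- Source B's _RANK.get(s, 1): severity of one status
def pvRank (s : String) : Nat :=
  PySem.Dict.getD (PySem.Dict.ofList [("verified", 0), ("partial", 2), ("unknown", 2), ("missing", 3)]) s 1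

-- Source B's _LABEL tuple
def pvLabel : List String := ["verified", "unknown", "partial", "missing"]

def syntax_coverage_label_alt (statuses : List String) (enabled : Bool) : String :=
  if !enabled then "skipped"
  else
    match statuses with
    | [] => "unknown"
    | x :: xs =>
      -- max(...) over a nonempty generator, fold starting at the first element's rank
      pvLabel.getD (xs.foldl (fun acc s => max acc (pvRank s)) (pvRank x)) "unknown"
      -- the default is unreachable: ranks are ≤ 3

-- ===== PRECONDITION & SPEC =====
def Spec_syntax_coverage_label (statuses : List String) (enabled : Bool) (out : String) : Prop := out = syntax_coverage_label_alt statuses enabled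
instance (statuses : List String) (enabled : Bool) (out : String) : Decidable (Spec_syntax_coverage_label statuses enabled out) := by unfold Spec_syntax_coverage_label; infer_instance

-- ===== CLAIM (what is proved, stated in full; the proofs are below) =====
def Claim_equal_syntax_coverage_label : Prop := ∀ (statuses : List String) (enabled : Bool), Dom_syntax_coverage_label statuses enabled → Spec_syntax_coverage_label statuses enabled (syntax_coverage_label statuses enabled)

-- ===== LEMMAS AND PROOFS =====

-- maximum severity of a (possibly empty) list, foldr form
def pvMaxRank (xs : List String) : Nat := (xs.map pvRank).foldr max 0

-- the rank dict lookup, as an if-chain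
theorem pvRank_eq (y : String) :
    pvRank y = (if y = "missing" then 3 else if y = "partial" then 2
                else if y = "unknown" then 2 else if y = "verified" then 0 else 1) := by
  unfold pvRank
  rw [show PySem.Dict.ofList [("verified", (0:Nat)), ("partial", 2), ("unknown", 2), ("missing", 3)]
        = PySem.Dict.mk [("verified", 0), ("partial", 2), ("unknown", 2), ("missing", 3)] from by decide]
  by_cases h1 : y = "missing"
  · subst h1; decide
  by_cases h2 : y = "partial"
  · subst h2; decide
  by_cases h3 : y = "unknown"
  · subst h3; decide
  by_cases h4 : y = "verified"
  · subst h4; decide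
  rw [PySem.Dict.getD_of_not_contains]
  · simp [h1, h2, h3, h4]
  · rw [PySem.Dict.contains_eq_decide_mem_keys]
    simp [h1, h2, h3, h4, PySem.Dict.keys]

-- the "partial/unknown" set membership, as a boolean disjunction
theorem contains_pu (y : String) :
    PySem.Set.contains (PySem.Set.ofList ["partial", "unknown"]) y
      = (y == "partial" || y == "unknown") := by
  rw [Bool.eq_iff_iff]
  simp [PySem.Set.contains, PySem.Set.mem_ofList]

-- B's foldl accumulates the max from accumulator a
theorem foldl_rank_eq (xs : List String) (a : Nat) :
    xs.foldl (fun acc s => max acc (pvRank s)) a = max a (pvMaxRank xs) := by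
  induction xs generalizing a with
  | nil => simp [pvMaxRank]
  | cons y ys ih =>
    simp only [List.foldl_cons, ih, pvMaxRank, List.map_cons, List.foldr_cons]
    omega

-- the maximum severity is determined by A's three scans
theorem maxRank_eq_scans (xs : List String) :
    pvMaxRank xs =
      (if xs.any (fun item => item == "missing") then 3
       else if xs.any (fun item => PySem.Set.contains (PySem.Set.ofList ["partial", "unknown"]) item) then 2
       else if xs.all (fun item => item == "verified") then 0
       else 1) := by
  induction xs with
  | nil => simp [pvMaxRank]
  | cons y ys ih =>
    have hstep : pvMaxRank (y :: ys) = max (pvRank y) (pvMaxRank ys) := rfl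
    rw [hstep, ih, pvRank_eq y, List.any_cons, List.any_cons, List.all_cons, contains_pu]
    by_cases h1 : y = "missing" <;> by_cases h2 : y = "partial" <;>
      by_cases h3 : y = "unknown" <;> by_cases h4 : y = "verified" <;>
      simp [h1, h2, h3, h4] <;> split_ifs <;> simp_all

-- if every status is "verified", the other two scans find nothing
theorem all_verified_no_missing (l : List String) (h : l.all (fun item => item == "verified") = true) :
    l.any (fun item => item == "missing") = false := by
  simp only [List.all_eq_true, beq_iff_eq] at h
  simp only [List.any_eq_false, beq_iff_eq]
  intro x hx
  simp [h x hx]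

theorem all_verified_no_pu (l : List String) (h : l.all (fun item => item == "verified") = true) :
    l.any (fun item => PySem.Set.contains (PySem.Set.ofList ["partial", "unknown"]) item) = false := by
  simp only [List.all_eq_true, beq_iff_eq] at h
  simp only [List.any_eq_false]
  intro x hx
  rw [h x hx, contains_pu]
  decide

-- ===== VERDICT (by name: the statement is the Claim_ definition above) =====
theorem syntax_coverage_label_spec : Claim_equal_syntax_coverage_label := by
  intro statuses enabled _
  unfold Spec_syntax_coverage_label syntax_coverage_label syntax_coverage_label_alt
  cases enabled with
  | false => rfl
  | true =>
    match statuses with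
    | [] => rfl
    | x :: xs =>
      simp only [Bool.not_true, Bool.false_eq_true, if_false, reduceCtorEq, foldl_rank_eq]
      have h : max (pvRank x) (pvMaxRank xs) = pvMaxRank (x :: xs) := rfl
      rw [h, maxRank_eq_scans]
      by_cases hv : ((x :: xs).all fun item => item == "verified") = true
      · rw [all_verified_no_missing _ hv, all_verified_no_pu _ hv]
        simp [hv, pvLabel]
      · have hv' := Bool.eq_false_iff.mpr hv
        by_cases hm : ((x :: xs).any fun item => item == "missing") = true
        · simp [hv', hm, pvLabel]
        · have hm' := Bool.eq_false_iff.mpr hm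
          by_cases hp : ((x :: xs).any fun item => PySem.Set.contains (PySem.Set.ofList ["partial", "unknown"]) item) = true
          · have hc : (x = "partial" ∨ x = "unknown") ∨ ∃ z ∈ xs, z = "partial" ∨ z = "unknown" := by
              simpa [contains_pu] using hp
            simp [hv', hm', hc, pvLabel]
          · have hp' := Bool.eq_false_iff.mpr hp
            have hc : ¬ ((x = "partial" ∨ x = "unknown") ∨ ∃ z ∈ xs, z = "partial" ∨ z = "unknown") := by
              simpa [contains_pu] using hp
            simp [hv', hm', hc, pvLabel]
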